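-- pv_equiv track=rewrite | github.com/Intruder9211/DSA-2025 | DAY-04/01_Number_of_Longest_tribonacci.py | count_tribonacci_subarrays
-- ===== SOURCE A (Python) =====
-- def count_tribonacci_subarrays(n, arr):
--     MOD = 10**9 + 7
--
--     # Step 1: Tribonacci numbers generate karo (jitne 10^5 se chhote ho)
--     trib_set = set()
--     t0, t1, t2 = 0, 1, 1
--     trib_set.update([t0, t1, t2])
--     while True:
--         t3 = t0 + t1 + t2
--         if t3 > 1e5:
--             break
--         trib_set.add(t3)
--         t0, t1, t2 = t1, t2, t3
--
--     # Step 2: Array ke andar subarrays count karo jo sirf Tribonacci numbers se bane ho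
--     count = 0
--     length = 0
--
--     for num in arr:
--         if num in trib_set:
--             length += 1  # Tribonacci number mila
--         else:
--             # Agar pehle ek valid segment chal raha tha, to uska result add karo
--             if length > 0:
--                 count = (count + (length * (length + 1)) // 2) % MOD
--                 length = 0  # Reset segment
--
--     # Agar last me bhi ek valid segment bacha ho to use count karo
--     if length > 0:
--         count = (count + (length * (length + 1)) // 2) % MOD
--
--     return count
-- ===== SOURCE B (Python) =====
-- def count_tribonacci_subarrays(n, arr):
--     MOD = 10**9 + 7
--
--     # Tribonacci numbers up to 10^5 (same construction as before)
--     trib_set = set()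
--     t0, t1, t2 = 0, 1, 1
--     trib_set.update([t0, t1, t2])
--     while True:
--         t3 = t0 + t1 + t2
--         if t3 > 1e5:
--             break
--         trib_set.add(t3)
--         t0, t1, t2 = t1, t2, t3
--
--     # Count valid subarrays by their right endpoint: each valid element ending a
--     # run of `length` valid elements contributes `length` new subarrays.
--     count = 0
--     length = 0
--     for num in arr:
--         if num in trib_set:
--             length += 1
--             count = (count + length) % MOD
--         else:
--             length = 0
--     return count
-- ===== Notes on version B (the rewrite author's own statement) =====
-- stated objective: simpler
-- what changed: Counting is done incrementally by right endpoint (count += length at each valid element, mod each step) instead of flushing the triangular-number formula L*(L+1)//2 at each segment boundary, which removes the end-of-loop flush block.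
import Mathlib
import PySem

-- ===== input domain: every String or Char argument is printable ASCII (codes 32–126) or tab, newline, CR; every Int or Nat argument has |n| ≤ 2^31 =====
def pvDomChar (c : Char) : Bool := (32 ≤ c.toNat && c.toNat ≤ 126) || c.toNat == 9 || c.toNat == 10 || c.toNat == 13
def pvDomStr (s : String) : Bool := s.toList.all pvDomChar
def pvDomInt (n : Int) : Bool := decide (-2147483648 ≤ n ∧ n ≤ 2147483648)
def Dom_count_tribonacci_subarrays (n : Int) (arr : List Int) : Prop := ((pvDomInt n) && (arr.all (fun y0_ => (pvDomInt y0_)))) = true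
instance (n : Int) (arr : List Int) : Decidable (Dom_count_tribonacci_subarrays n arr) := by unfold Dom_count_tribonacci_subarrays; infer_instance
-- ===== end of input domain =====

-- B replaces A's per-segment triangular-formula flush by per-element incremental
-- counting (count += run length at each valid element); simpler, same cost.

-- ===== PORT A =====
-- the tribonacci-set construction (identical Python in A and B, so shared here);
-- fuel only makes the while-loop total: the values triple-exponentially exceeds 10^5 well within 60 steps
def pvTribLoop : Nat → Int → Int → Int → PySem.Set Int → PySem.Set Int
  | 0, _, _, _, s => s
  | f + 1, t0, t1, t2, s =>
      let t3 := t0 + t1 + t2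
      if t3 > 100000 then s          -- `t3 > 1e5` is exact here: t3 and 10^5 are small integers
      else pvTribLoop f t1 t2 t3 (PySem.Set.add s t3)

def pvTribSet : PySem.Set Int :=
  pvTribLoop 60 0 1 1 (PySem.Set.update PySem.Set.empty [0, 1, 1])

-- loop body of A: on a non-tribonacci element, flush length*(length+1)//2 into count
def pvStepA (st : Int × Int) (num : Int) : Int × Int :=
  if PySem.Set.contains pvTribSet num then (st.1, st.2 + 1)
  else if st.2 > 0 then
    (PySem.Int.mod (st.1 + PySem.Int.floordiv (st.2 * (st.2 + 1)) 2) 1000000007, 0)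
  else st

-- the final flush after the loop
def pvFlushA (st : Int × Int) : Int :=
  if st.2 > 0 then
    PySem.Int.mod (st.1 + PySem.Int.floordiv (st.2 * (st.2 + 1)) 2) 1000000007
  else st.1

def count_tribonacci_subarrays (n : Int) (arr : List Int) : Int :=
  pvFlushA (arr.foldl pvStepA (0, 0))

-- ===== PORT B =====
-- loop body of B: each valid element adds the current run length to count
def pvStepB (st : Int × Int) (num : Int) : Int × Int :=
  if PySem.Set.contains pvTribSet num then
    (PySem.Int.mod (st.1 + (st.2 + 1)) 1000000007, st.2 + 1)
  else (st.1, 0)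

def count_tribonacci_subarrays_alt (n : Int) (arr : List Int) : Int :=
  (arr.foldl pvStepB (0, 0)).1

-- ===== PRECONDITION & SPEC =====
def Spec_count_tribonacci_subarrays (n : Int) (arr : List Int) (out : Int) : Prop := out = count_tribonacci_subarrays_alt n arr
instance (n : Int) (arr : List Int) (out : Int) : Decidable (Spec_count_tribonacci_subarrays n arr out) := by unfold Spec_count_tribonacci_subarrays; infer_instance

-- ===== CLAIM (what is proved, stated in full; the proofs are below) =====
def Claim_equal_count_tribonacci_subarrays : Prop := ∀ (n : Int) (arr : List Int), Dom_count_tribonacci_subarrays n arr → Spec_count_tribonacci_subarrays n arr (count_tribonacci_subarrays n arr)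

-- ===== LEMMAS AND PROOFS =====

-- triangular increment: l*(l+1)//2 + (l+1) = (l+1)*(l+2)//2
theorem pv_tri_succ (l : Int) :
    PySem.Int.floordiv ((l + 1) * (l + 2)) 2 = PySem.Int.floordiv (l * (l + 1)) 2 + (l + 1) := by
  rw [PySem.Int.floordiv_eq_ediv_of_pos (by norm_num),
      PySem.Int.floordiv_eq_ediv_of_pos (by norm_num)]
  have h : (l + 1) * (l + 2) = l * (l + 1) + (l + 1) * 2 := by ring
  rw [h, Int.add_mul_ediv_right _ _ (by norm_num : (2 : Int) ≠ 0)]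

-- invariant: B's count is A's count plus the pending triangular term, reduced mod 10^9+7
theorem pv_inv : ∀ (arr : List Int) (c l : Int), 0 ≤ c → c < 1000000007 → 0 ≤ l →
    (arr.foldl pvStepB (PySem.Int.mod (c + PySem.Int.floordiv (l * (l + 1)) 2) 1000000007, l)).1
      = pvFlushA (arr.foldl pvStepA (c, l)) := by
  intro arr
  induction arr with
  | nil =>
      intro c l hc hcM hl
      simp only [List.foldl, pvFlushA]
      split_ifs with h
      · rfl
      · have hl0 : l = 0 := by omega
        subst hl0
        have ht : PySem.Int.floordiv ((0 : Int) * (0 + 1)) 2 = 0 := by decide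
        rw [ht, PySem.Int.mod_eq_emod_of_pos (by norm_num)]
        omega
  | cons num rest ih =>
      intro c l hc hcM hl
      simp only [List.foldl]
      by_cases hmem : PySem.Set.contains pvTribSet num = true
      · have hstA : pvStepA (c, l) num = (c, l + 1) := by
          simp only [pvStepA]; rw [if_pos hmem]
        have hstB : pvStepB (PySem.Int.mod (c + PySem.Int.floordiv (l * (l + 1)) 2) 1000000007, l) num
            = (PySem.Int.mod (c + PySem.Int.floordiv ((l + 1) * ((l + 1) + 1)) 2) 1000000007, l + 1) := by
          simp only [pvStepB]; rw [if_pos hmem]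
          refine Prod.ext ?_ rfl
          have harg : (l + 1) * ((l + 1) + 1) = (l + 1) * (l + 2) := by ring
          rw [harg, pv_tri_succ, PySem.Int.mod_eq_emod_of_pos (by norm_num),
              PySem.Int.mod_eq_emod_of_pos (by norm_num)]
          generalize PySem.Int.floordiv (l * (l + 1)) 2 = t
          rw [Int.emod_add_emod, add_assoc]
          simp [PySem.Int.mod_eq_emod_of_pos (by norm_num : (0:Int) < 1000000007)]
        rw [hstA, hstB]
        exact ih c (l + 1) hc hcM (by omega)
      · have hstB : pvStepB (PySem.Int.mod (c + PySem.Int.floordiv (l * (l + 1)) 2) 1000000007, l) num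
            = (PySem.Int.mod (c + PySem.Int.floordiv (l * (l + 1)) 2) 1000000007, 0) := by
          simp only [pvStepB]; rw [if_neg hmem]
        rw [hstB]
        by_cases hl0 : l > 0
        · have hstA : pvStepA (c, l) num
              = (PySem.Int.mod (c + PySem.Int.floordiv (l * (l + 1)) 2) 1000000007, 0) := by
            simp only [pvStepA]; rw [if_neg hmem, if_pos hl0]
          rw [hstA]
          set c' := PySem.Int.mod (c + PySem.Int.floordiv (l * (l + 1)) 2) 1000000007 with hc'
          have h0 : 0 ≤ c' := PySem.Int.mod_nonneg _ (by norm_num)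
          have h1 : c' < 1000000007 := PySem.Int.mod_lt _ (by norm_num)
          have hz : PySem.Int.mod (c' + PySem.Int.floordiv ((0 : Int) * (0 + 1)) 2) 1000000007 = c' := by
            have ht : PySem.Int.floordiv ((0 : Int) * (0 + 1)) 2 = 0 := by decide
            rw [ht, PySem.Int.mod_eq_emod_of_pos (by norm_num)]
            omega
          have := ih c' 0 h0 h1 le_rfl
          rw [hz] at this
          exact this
        · have hl0' : l = 0 := by omega
          subst hl0'
          have hstA : pvStepA (c, 0) num = (c, 0) := by
            simp only [pvStepA]; rw [if_neg hmem, if_neg hl0]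
          rw [hstA]
          exact ih c 0 hc hcM le_rfl

-- ===== VERDICT (by name: the statement is the Claim_ definition above) =====
theorem count_tribonacci_subarrays_spec : Claim_equal_count_tribonacci_subarrays := by
  intro n arr _
  unfold Spec_count_tribonacci_subarrays count_tribonacci_subarrays count_tribonacci_subarrays_alt
  have := pv_inv arr 0 0 le_rfl (by norm_num) le_rfl
  have hz : PySem.Int.mod ((0 : Int) + PySem.Int.floordiv ((0 : Int) * (0 + 1)) 2) 1000000007 = 0 := by
    decide
  rw [hz] at this
  exact this.symm
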